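-- pv_equiv track=rewrite | github.com/ZhenYuTangNJU/JGR_DAS-code | code/Spectorgram_dataget.py | trigger_event
-- ===== SOURCE A (Python) =====
-- def trigger_event(ratio, trigger_threshold, detrigger_threshold, fs):
--     events = []
--     on_event = False
--     last_event_time = -fs * 4  # 初始化为负的间隔，确保第一个事件可以被检测
--     fs_interval = fs * 4  # 三秒的样本数
--
--     for i, r in enumerate(ratio):
--         if r > trigger_threshold and not on_event and (i - last_event_time) > fs_interval:
--             events.append((i, 'ON'))
--             on_event = True
--             last_event_time = i  # 更新最近一次事件触发的时间
--         elif r < detrigger_threshold and on_event: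
--             events.append((i, 'OFF'))
--             on_event = False
--
--     return events
-- ===== SOURCE B (Python) =====
-- def trigger_event(ratio, trigger_threshold, detrigger_threshold, fs):
--     fs_interval = fs * 4
--     n = len(ratio)
--     events = []
--     last_on = -fs_interval
--     i = 0
--     while True:
--         # advance to the next index that fires an ON event
--         while i < n and not (ratio[i] > trigger_threshold and i - last_on > fs_interval):
--             i += 1
--         if i >= n:
--             break
--         events.append((i, 'ON'))
--         last_on = i
--         i += 1
--         # advance to the next index that fires an OFF event
--         while i < n and not (ratio[i] < detrigger_threshold):
--             i += 1
--         if i >= n: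
--             break
--         events.append((i, 'OFF'))
--         i += 1
--     return events
-- ===== Notes on version B (the rewrite author's own statement) =====
-- stated objective: alternative
-- what changed: Replaces the flag-based enumerate scan carrying an on/off state machine with a cursor-driven while loop that alternately fast-forwards the index to the next ON trigger and then to the next OFF de-trigger, keeping only the cursor and the last ON time.
import Mathlib
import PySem

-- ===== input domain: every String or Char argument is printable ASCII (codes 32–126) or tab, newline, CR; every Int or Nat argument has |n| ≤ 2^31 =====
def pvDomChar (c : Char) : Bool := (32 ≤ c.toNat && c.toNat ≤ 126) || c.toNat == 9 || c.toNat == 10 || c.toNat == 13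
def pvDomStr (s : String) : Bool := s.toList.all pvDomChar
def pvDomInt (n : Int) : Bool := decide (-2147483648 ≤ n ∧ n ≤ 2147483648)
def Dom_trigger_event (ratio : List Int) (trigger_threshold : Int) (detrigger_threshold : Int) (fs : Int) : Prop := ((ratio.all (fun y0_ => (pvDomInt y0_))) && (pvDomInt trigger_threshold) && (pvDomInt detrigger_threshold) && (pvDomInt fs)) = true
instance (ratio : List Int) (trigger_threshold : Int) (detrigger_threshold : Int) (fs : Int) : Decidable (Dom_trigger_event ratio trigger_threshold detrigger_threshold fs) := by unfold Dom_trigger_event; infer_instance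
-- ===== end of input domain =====

-- ===== PORT A =====
-- flag-based scan: fold over enumerate carrying (events, on_event, last_event_time)
def aStep (trigger_threshold detrigger_threshold fs_interval : Int)
    (st : List (Int × String) × Bool × Int) (p : Int × Int) : List (Int × String) × Bool × Int :=
  if p.2 > trigger_threshold ∧ st.2.1 = false ∧ p.1 - st.2.2 > fs_interval then
    (st.1 ++ [(p.1, "ON")], true, p.1)
  else if p.2 < detrigger_threshold ∧ st.2.1 = true then
    (st.1 ++ [(p.1, "OFF")], false, st.2.2)
  else st

def trigger_event (ratio : List Int) (trigger_threshold : Int) (detrigger_threshold : Int) (fs : Int) : List (Int × String) :=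
  ((PySem.List.enumerate ratio).foldl
    (aStep trigger_threshold detrigger_threshold (fs * 4)) ([], false, -fs * 4)).1

-- ===== PORT B =====
-- cursor-based: alternately fast-forward to the next ON trigger, then to the next OFF de-trigger
mutual
def bSearchOn : List Int → Int → Int → Int → Int → Int → List (Int × String)
  | [], _, _, _, _, _ => []
  | r :: rest, i, tt, dt, fsi, last =>
    if r > tt ∧ i - last > fsi then (i, "ON") :: bSearchOff rest (i + 1) tt dt fsi i
    else bSearchOn rest (i + 1) tt dt fsi last

def bSearchOff : List Int → Int → Int → Int → Int → Int → List (Int × String)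
  | [], _, _, _, _, _ => []
  | r :: rest, i, _tt, dt, _fsi, last =>
    if r < dt then (i, "OFF") :: bSearchOn rest (i + 1) _tt dt _fsi last
    else bSearchOff rest (i + 1) _tt dt _fsi last
end

def trigger_event_alt (ratio : List Int) (trigger_threshold : Int) (detrigger_threshold : Int) (fs : Int) : List (Int × String) :=
  bSearchOn ratio 0 trigger_threshold detrigger_threshold (fs * 4) (-(fs * 4))

-- ===== PRECONDITION & SPEC =====
def Spec_trigger_event (ratio : List Int) (trigger_threshold : Int) (detrigger_threshold : Int) (fs : Int) (out : List (Int × String)) : Prop := out = trigger_event_alt ratio trigger_threshold detrigger_threshold fs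
instance (ratio : List Int) (trigger_threshold : Int) (detrigger_threshold : Int) (fs : Int) (out : List (Int × String)) : Decidable (Spec_trigger_event ratio trigger_threshold detrigger_threshold fs out) := by unfold Spec_trigger_event; infer_instance

-- ===== CLAIM (what is proved, stated in full; the proofs are below) =====
def Claim_equal_trigger_event : Prop := ∀ (ratio : List Int) (trigger_threshold : Int) (detrigger_threshold : Int) (fs : Int), Dom_trigger_event ratio trigger_threshold detrigger_threshold fs → Spec_trigger_event ratio trigger_threshold detrigger_threshold fs (trigger_event ratio trigger_threshold detrigger_threshold fs)

-- ===== LEMMAS AND PROOFS =====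
-- loop invariant: A's fold from any state equals the events so far plus the phase search B is in
theorem fold_eq_search (tt dt fsi : Int) :
    ∀ (xs : List Int) (k : Int) (ev : List (Int × String)) (on : Bool) (last : Int),
      ((PySem.List.enumerate xs k).foldl (aStep tt dt fsi) (ev, on, last)).1
        = ev ++ (if on then bSearchOff xs k tt dt fsi last else bSearchOn xs k tt dt fsi last) := by
  intro xs
  induction xs with
  | nil => intro k ev on last; simp [PySem.List.enumerate_nil, bSearchOn, bSearchOff]
  | cons r rest ih =>
    intro k ev on last
    rw [PySem.List.enumerate_cons, List.foldl_cons]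
    cases on with
    | false =>
      by_cases h : r > tt ∧ k - last > fsi
      · simp [aStep, h.1, h.2, ih, bSearchOn]
      · have h' : ¬ (r > tt ∧ false = false ∧ k - last > fsi) := by
          intro hc; exact h ⟨hc.1, hc.2.2⟩
        simp only [aStep, if_neg h']
        simp [ih, bSearchOn, h]
    | true =>
      by_cases h : r < dt
      · simp [aStep, h, ih, bSearchOff]
      · simp [aStep, h, ih, bSearchOff]

-- ===== VERDICT (by name: the statement is the Claim_ definition above) =====
theorem trigger_event_spec : Claim_equal_trigger_event := by
  intro ratio tt dt fs _
  show trigger_event ratio tt dt fs = trigger_event_alt ratio tt dt fs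
  unfold trigger_event trigger_event_alt
  rw [fold_eq_search]
  simp
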